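-- pv_equiv track=rewrite | github.com/Knack117/mtg-mightstone-gpt | utils/identity.py | _sort_code_letters
-- ===== SOURCE A (Python) =====
-- WUBRG_ORDER = "wubrg"
--
-- def _sort_code_letters(raw: str) -> str:
--     letters = [c for c in raw if c in WUBRG_ORDER]
--     seen = set()
--     ordered = []
--     for c in WUBRG_ORDER:
--         if c in letters and c not in seen:
--             ordered.append(c)
--             seen.add(c)
--     return "".join(ordered)
-- ===== SOURCE B (Python) =====
-- WUBRG_ORDER = "wubrg"
--
-- def _sort_code_letters(raw: str) -> str:
--     return "".join(sorted(set(raw) & set(WUBRG_ORDER), key=WUBRG_ORDER.index))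
-- ===== Notes on version B (the rewrite author's own statement) =====
-- stated objective: idiomatic
-- what changed: B replaces A's filter-into-list plus seen-set scan of the fixed order with a single set intersection followed by a key-sort on WUBRG_ORDER.index.
import Mathlib
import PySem

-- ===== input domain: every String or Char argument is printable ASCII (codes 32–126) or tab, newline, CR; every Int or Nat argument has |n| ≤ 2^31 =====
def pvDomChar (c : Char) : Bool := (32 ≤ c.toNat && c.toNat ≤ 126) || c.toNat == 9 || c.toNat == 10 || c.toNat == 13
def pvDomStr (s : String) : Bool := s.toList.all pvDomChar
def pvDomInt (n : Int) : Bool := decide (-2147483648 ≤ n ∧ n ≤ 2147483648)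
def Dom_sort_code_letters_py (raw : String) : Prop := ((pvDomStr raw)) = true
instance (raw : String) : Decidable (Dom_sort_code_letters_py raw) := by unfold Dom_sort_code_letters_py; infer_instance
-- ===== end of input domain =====

-- B computes the same WUBRG-ordered dedup via a set intersection and a key-sort on the
-- fixed order's index instead of A's filter-into-list plus seen-set scan (objective: idiomatic).


-- ===== PORT A =====
-- WUBRG_ORDER = "wubrg"
def pvWUBRG : List Char := "wubrg".toList

-- letters = [c for c in raw if c in WUBRG_ORDER]; seen = set(); ordered = [];
-- for c in WUBRG_ORDER: if c in letters and c not in seen: ordered.append(c); seen.add(c)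
-- return "".join(ordered)
def sort_code_letters_py (raw : String) : String :=
  let letters := raw.toList.filter (fun c => pvWUBRG.contains c)
  let st := pvWUBRG.foldl
    (fun (st : PySem.Set Char × List Char) c =>
      if letters.contains c && !(PySem.Set.contains st.1 c) then
        (PySem.Set.add st.1 c, st.2 ++ [c])
      else st)
    (PySem.Set.empty, [])
  String.mk st.2

-- ===== PORT B =====
-- return "".join(sorted(set(raw) & set(WUBRG_ORDER), key=WUBRG_ORDER.index))
-- (the sort key WUBRG_ORDER.index is injective on the set, so the set's iteration order is immaterial)
def sort_code_letters_py_alt (raw : String) : String :=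
  String.mk (PySem.List.sorted
    (PySem.Set.inter (PySem.Set.ofList raw.toList) (PySem.Set.ofList pvWUBRG))
    (fun c => PySem.Chars.find pvWUBRG [c]) false)

-- ===== PRECONDITION & SPEC =====
def Spec_sort_code_letters_py (raw : String) (out : String) : Prop := out = sort_code_letters_py_alt raw
instance (raw : String) (out : String) : Decidable (Spec_sort_code_letters_py raw out) := by unfold Spec_sort_code_letters_py; infer_instance

-- ===== CLAIM (what is proved, stated in full; the proofs are below) =====
def Claim_equal_sort_code_letters_py : Prop := ∀ (raw : String), Dom_sort_code_letters_py raw → Spec_sort_code_letters_py raw (sort_code_letters_py raw)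

-- ===== LEMMAS AND PROOFS =====

-- the common canonical value: the letters of "wubrg", in that order, that occur in l
def pvCanon (l : List Char) : List Char := pvWUBRG.filter (fun c => l.contains c)

theorem pvA_eq_canon (l : List Char) :
    (pvWUBRG.foldl
      (fun (st : PySem.Set Char × List Char) c =>
        if (l.filter (fun c => pvWUBRG.contains c)).contains c && !(PySem.Set.contains st.1 c) then
          (PySem.Set.add st.1 c, st.2 ++ [c])
        else st)
      (PySem.Set.empty, [])).2 = pvCanon l := by
  by_cases hw : 'w' ∈ l <;> by_cases hu : 'u' ∈ l <;> by_cases hb : 'b' ∈ l <;>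
    by_cases hr : 'r' ∈ l <;> by_cases hg : 'g' ∈ l <;>
  simp [pvWUBRG, pvCanon, List.foldl, PySem.Set.add, PySem.Set.empty,
        PySem.Set.contains, List.mem_filter, hw, hu, hb, hr, hg]

theorem pvB_eq_canon (l : List Char) :
    PySem.List.sorted (PySem.Set.inter (PySem.Set.ofList l) (PySem.Set.ofList pvWUBRG))
      (fun c => PySem.Chars.find pvWUBRG [c]) false = pvCanon l := by
  apply PySem.List.sorted_eq_of_perm_of_pairwise_lt
  · unfold pvCanon
    rw [List.perm_ext_iff_of_nodup (List.Nodup.filter _ (by decide))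
        (PySem.Set.nodup_inter _ _ (PySem.Set.nodup_ofList l))]
    intro x
    simp [PySem.Set.mem_inter, PySem.Set.mem_ofList, List.mem_filter, and_comm]
  · exact List.Pairwise.sublist List.filter_sublist (by decide)

-- ===== VERDICT (by name: the statement is the Claim_ definition above) =====
theorem sort_code_letters_py_spec : Claim_equal_sort_code_letters_py := by
  intro raw _
  show sort_code_letters_py raw = sort_code_letters_py_alt raw
  unfold sort_code_letters_py sort_code_letters_py_alt
  exact congrArg String.mk ((pvA_eq_canon raw.toList).trans (pvB_eq_canon raw.toList).symm)
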